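-- pv_equiv track=rewrite | github.com/mahesharma1984/literary-analysis-automation | create_kernel.py | _format_devices_for_prompt
-- ===== SOURCE A (Python) =====
-- def _format_devices_for_prompt(devices: list) -> str:
--     """Format micro devices for Stage 3 prompt."""
--     lines = [f"MICRO DEVICES ({len(devices)} total):"]
--
--     by_section = {}
--     for d in devices:
--         section = d.get('assigned_section', 'unknown')
--         if section not in by_section:
--             by_section[section] = []
--         by_section[section].append(d)
--
--     for section in ['exposition', 'rising_action', 'climax', 'falling_action', 'resolution']:
--         if section in by_section:
--             lines.append(f"\n{section.upper().replace('_', ' ')}:")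
--             for d in by_section[section]:
--                 lines.append(f"  - {d['name']} ({d.get('classification', '')})")
--
--     return "\n".join(lines)
-- ===== SOURCE B (Python) =====
-- def _format_devices_for_prompt(devices: list) -> str:
--     """Format micro devices for Stage 3 prompt (section-filter version, no grouping dict)."""
--     lines = [f"MICRO DEVICES ({len(devices)} total):"]
--     for section in ['exposition', 'rising_action', 'climax', 'falling_action', 'resolution']:
--         group = [d for d in devices if d.get('assigned_section', 'unknown') == section]
--         if group:
--             lines.append(f"\n{section.upper().replace('_', ' ')}:")
--             lines.extend(f"  - {d['name']} ({d.get('classification', '')})" for d in group)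
--     return "\n".join(lines)
-- ===== Notes on version B (the rewrite author's own statement) =====
-- stated objective: simpler
-- what changed: Drops the grouping dict entirely: B loops over the five fixed sections and filters the device list per section, instead of building a by_section dict first and then looking groups up.
import Mathlib
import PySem

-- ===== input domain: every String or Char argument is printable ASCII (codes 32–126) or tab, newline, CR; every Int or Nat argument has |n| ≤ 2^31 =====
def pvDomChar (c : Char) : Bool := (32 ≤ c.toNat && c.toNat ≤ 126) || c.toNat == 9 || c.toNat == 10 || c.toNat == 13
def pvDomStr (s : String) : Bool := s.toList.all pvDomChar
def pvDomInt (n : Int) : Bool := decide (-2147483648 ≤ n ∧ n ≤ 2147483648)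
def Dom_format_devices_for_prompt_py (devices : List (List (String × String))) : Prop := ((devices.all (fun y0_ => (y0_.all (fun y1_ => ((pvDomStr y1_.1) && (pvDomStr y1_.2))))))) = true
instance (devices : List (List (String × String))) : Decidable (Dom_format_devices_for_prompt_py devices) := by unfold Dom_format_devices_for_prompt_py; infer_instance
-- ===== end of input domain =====

-- B replaces A's by_section grouping dict with a per-section filter scan over the fixed five-section list (simpler).
-- Pre_ excludes exactly the inputs on which Python A raises KeyError (a device assigned to one of the
-- five listed sections without a 'name' key); Python B raises there too.


-- shared formatting helpers (identical text in both Pythons)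
-- d.get(k, dflt) on a device dict (assoc list, first-match lookup)
def pvGetD (d : List (String × String)) (k dflt : String) : String :=
  (PySem.Dict.mk d).getD k dflt

def pvSecOf (d : List (String × String)) : String :=
  pvGetD d "assigned_section" "unknown"

-- f"  - {d['name']} ({d.get('classification', '')})"; d['name'] raises KeyError when absent —
-- Pre_ excludes those inputs, so the "" default is never observed on the claimed domain.
def pvDevLine (d : List (String × String)) : String :=
  "  - " ++ pvGetD d "name" "" ++ " (" ++ pvGetD d "classification" "" ++ ")"

-- f"\n{section.upper().replace('_', ' ')}:"
def pvSectionHdr (s : String) : String :=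
  "\n" ++ PySem.Str.replace (PySem.Str.upper s) "_" " " ++ ":"

def pvSections : List String :=
  ["exposition", "rising_action", "climax", "falling_action", "resolution"]

-- ===== PORT A =====
-- 'if section not in by_section: by_section[section] = []' followed by '.append(d)' is exactly
-- by_section[section] = by_section.get(section, []) + [d], i.e. Dict.modify.
def format_devices_for_prompt_py (devices : List (List (String × String))) : String :=
  let lines0 : List String :=
    ["MICRO DEVICES (" ++ PySem.Int.toStr (devices.length : Int) ++ " total):"]
  let by_section : PySem.Dict String (List (List (String × String))) :=
    devices.foldl (fun bs d => bs.modify (pvSecOf d) [] (· ++ [d])) PySem.Dict.empty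
  let lines : List String :=
    pvSections.foldl (fun ls s =>
      if by_section.contains s then
        (by_section.getD s []).foldl (fun ls2 d => ls2 ++ [pvDevLine d]) (ls ++ [pvSectionHdr s])
      else ls) lines0
  PySem.Str.join "\n" lines

-- ===== PORT B =====
def format_devices_for_prompt_py_alt (devices : List (List (String × String))) : String :=
  let lines : List String :=
    pvSections.foldl (fun ls s =>
      let group := devices.filter (fun d => pvSecOf d == s)
      if group.isEmpty then ls
      else ls ++ [pvSectionHdr s] ++ group.map pvDevLine)
      ["MICRO DEVICES (" ++ PySem.Int.toStr (devices.length : Int) ++ " total):"]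
  PySem.Str.join "\n" lines

-- ===== PRECONDITION & SPEC =====
-- Pre_ excludes exactly the inputs on which A raises KeyError: a device whose assigned section is one
-- of the five listed sections but which has no 'name' key (A returns on every other input).
def Pre_format_devices_for_prompt_py (devices : List (List (String × String))) : Prop :=
  ∀ d ∈ devices, pvSecOf d ∈ pvSections → (PySem.Dict.mk d).contains "name" = true

instance (devices : List (List (String × String))) : Decidable (Pre_format_devices_for_prompt_py devices) := by
  unfold Pre_format_devices_for_prompt_py; infer_instance

def pvWitness_format_devices_for_prompt_py : (List (List (String × String))) :=
  [[("name", "metaphor"), ("assigned_section", "climax"), ("classification", "imagery")],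
   [("name", "irony"), ("assigned_section", "resolution")]]

def Spec_format_devices_for_prompt_py (devices : List (List (String × String))) (out : String) : Prop := out = format_devices_for_prompt_py_alt devices
instance (devices : List (List (String × String))) (out : String) : Decidable (Spec_format_devices_for_prompt_py devices out) := by unfold Spec_format_devices_for_prompt_py; infer_instance

-- ===== CLAIM (what is proved, stated in full; the proofs are below) =====
def Claim_equal_format_devices_for_prompt_py : Prop := ∀ (devices : List (List (String × String))), Dom_format_devices_for_prompt_py devices → Pre_format_devices_for_prompt_py devices → Spec_format_devices_for_prompt_py devices (format_devices_for_prompt_py devices)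

-- ===== LEMMAS AND PROOFS =====

-- the grouping fold's value at key s is the filter of the devices by section
theorem pvGroup_getD (ds : List (List (String × String)))
    (bs : PySem.Dict String (List (List (String × String)))) (s : String) :
    (ds.foldl (fun bs d => bs.modify (pvSecOf d) [] (· ++ [d])) bs).getD s []
      = bs.getD s [] ++ ds.filter (fun d => pvSecOf d == s) := by
  induction ds generalizing bs with
  | nil => simp
  | cons d tl ih =>
    simp only [List.foldl_cons, ih, List.filter_cons]
    rw [PySem.Dict.getD_modify]
    by_cases h : s = pvSecOf d
    · simp [h]
    · have h' : ¬ pvSecOf d = s := fun hh => h hh.symm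
      simp [h, h', beq_iff_eq]

-- the grouping fold contains key s iff some device has section s
theorem pvGroup_contains (ds : List (List (String × String)))
    (bs : PySem.Dict String (List (List (String × String)))) (s : String) :
    (ds.foldl (fun bs d => bs.modify (pvSecOf d) [] (· ++ [d])) bs).contains s
      = (bs.contains s || !(ds.filter (fun d => pvSecOf d == s)).isEmpty) := by
  induction ds generalizing bs with
  | nil => simp
  | cons d tl ih =>
    simp only [List.foldl_cons, ih, List.filter_cons]
    rw [PySem.Dict.contains_modify]
    by_cases h : s = pvSecOf d
    · simp [h, Bool.or_comm]
    · have h' : ¬ pvSecOf d = s := fun hh => h hh.symm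
      simp [h', show (s == pvSecOf d) = false from beq_eq_false_iff_ne.mpr h]

-- flattening singleton lines is the map of the line function
theorem pvFlattenSing {α : Type} (g : List α) (f : α → String) :
    (g.map (fun x => [f x])).flatten = g.map f := by
  induction g with
  | nil => rfl
  | cons x tl ih => simp [ih]

-- ===== VERDICT (by name: the statement is the Claim_ definition above) =====
theorem format_devices_for_prompt_py_spec : Claim_equal_format_devices_for_prompt_py := by
  intro devices _ _
  show format_devices_for_prompt_py devices = format_devices_for_prompt_py_alt devices
  unfold format_devices_for_prompt_py format_devices_for_prompt_py_alt
  refine congrArg (PySem.Str.join "\n") (PySem.List.foldl_congr_mem _ _ _ _ ?_)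
  intro ls s _
  rw [pvGroup_contains, pvGroup_getD]
  simp only [PySem.Dict.contains_empty, PySem.Dict.getD_empty, Bool.false_or, List.nil_append]
  by_cases h : (devices.filter (fun d => pvSecOf d == s)).isEmpty <;>
    simp [h, pvFlattenSing, List.append_assoc]
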